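-- pv_equiv track=rewrite | github.com/merlinepedra/DeepPavlov | deeppavlov/models/morpho_tagger/common_tagger.py | get_tag_distance
-- ===== SOURCE A (Python) =====
-- from typing import Union, Optional, Tuple, List
--
-- def make_pos_and_tag(tag: str, sep: str = ",",
--                      return_mode: Optional[str] = None) -> Tuple[str, Union[str, list, dict, tuple]]:
--     """
--     Args:
--         tag: the part-of-speech tag
--         sep: the separator between part-of-speech tag and grammatical features
--         return_mode: the type of return value, can be None, list, dict or sorted_items
--
--     Returns:
--         the part-of-speech label and grammatical features in required format
--     """
--     if tag.endswith(" _"):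
--         tag = tag[:-2]
--     if sep in tag:
--         pos, tag = tag.split(sep, maxsplit=1)
--     else:
--         pos, tag = tag, ("_" if return_mode is None else "")
--     if return_mode in ["dict", "list", "sorted_items"]:
--         tag = tag.split("|") if tag != "" else []
--         if return_mode in ["dict", "sorted_items"]:
--             tag = dict(tuple(elem.split("=")) for elem in tag)
--             if return_mode == "sorted_items":
--                 tag = tuple(sorted(tag.items()))
--     return pos, tag
--
-- def _are_equal_pos(first, second):
--     NOUNS, VERBS, CONJ = ["NOUN", "PROPN"], ["AUX", "VERB"], ["CCONJ", "SCONJ"]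
--     return (first == second or any((first in parts) and (second in parts)
--                                    for parts in [NOUNS, VERBS, CONJ]))
--
-- IDLE_FEATURES = {"Voice", "Animacy", "Degree", "Mood", "VerbForm", "PronType", "Strength"}
--
-- def get_tag_distance(first, second, first_sep=",", second_sep=" ",
--                      match_similar_pos=True, idle_features=None, pos_diff_weight=2):
--     """
--     Measures the distance between two (Russian) morphological tags in UD Format.
--     The first tag is usually the one predicted by our model (therefore it uses comma
--     as separator), while the second is usually the result of automatical conversion,
--     where the separator is space.
--
--     Args:
--         first: UD morphological tag
--         second: UD morphological tag (usually the output of 'russian_tagsets' converter)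
--         first_sep: separator between two parts of the first tag
--         second_sep: separator between two parts of the second tag
--
--     Returns:
--         the number of mismatched feature values
--     """
--     if idle_features is None:
--         idle_features = IDLE_FEATURES
--     first_pos, first_feats = make_pos_and_tag(first, sep=first_sep, return_mode="dict")
--     second_pos, second_feats = make_pos_and_tag(second, sep=second_sep, return_mode="dict")
--     if match_similar_pos:
--         are_pos_equal = _are_equal_pos(first_pos, second_pos)
--     else:
--         are_pos_equal = (first_pos == second_pos)
--     dist = int(not are_pos_equal) * pos_diff_weight
--     for key, value in first_feats.items():
--         other = second_feats.get(key)
--         if other is None: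
--             dist += int(key not in idle_features)
--         else:
--             dist += int(value != other)
--     for key in second_feats:
--         dist += int(key not in first_feats and key not in idle_features)
--     return dist
-- ===== SOURCE B (Python) =====
-- from typing import Union, Optional, Tuple
--
-- def make_pos_and_tag(tag: str, sep: str = ",",
--                      return_mode: Optional[str] = None) -> Tuple[str, Union[str, list, dict, tuple]]:
--     if tag.endswith(" _"):
--         tag = tag[:-2]
--     if sep in tag:
--         pos, tag = tag.split(sep, maxsplit=1)
--     else:
--         pos, tag = tag, ("_" if return_mode is None else "")
--     if return_mode in ["dict", "list", "sorted_items"]: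
--         tag = tag.split("|") if tag != "" else []
--         if return_mode in ["dict", "sorted_items"]:
--             tag = dict(tuple(elem.split("=")) for elem in tag)
--             if return_mode == "sorted_items":
--                 tag = tuple(sorted(tag.items()))
--     return pos, tag
--
-- def _are_equal_pos(first, second):
--     NOUNS, VERBS, CONJ = ["NOUN", "PROPN"], ["AUX", "VERB"], ["CCONJ", "SCONJ"]
--     return (first == second or any((first in parts) and (second in parts)
--                                    for parts in [NOUNS, VERBS, CONJ]))
--
-- IDLE_FEATURES = {"Voice", "Animacy", "Degree", "Mood", "VerbForm", "PronType", "Strength"}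
--
-- def get_tag_distance(first, second, first_sep=",", second_sep=" ",
--                      match_similar_pos=True, idle_features=None, pos_diff_weight=2):
--     # Sort both feature-key lists and walk them with a two-pointer merge scan,
--     # instead of A's two dict-lookup loops.
--     idle = IDLE_FEATURES if idle_features is None else idle_features
--     first_pos, first_feats = make_pos_and_tag(first, sep=first_sep, return_mode="dict")
--     second_pos, second_feats = make_pos_and_tag(second, sep=second_sep, return_mode="dict")
--     pos_ok = _are_equal_pos(first_pos, second_pos) if match_similar_pos else first_pos == second_pos
--     dist = 0 if pos_ok else pos_diff_weight
--     fk, sk = sorted(first_feats), sorted(second_feats)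
--     i = j = 0
--     while i < len(fk) and j < len(sk):
--         if fk[i] < sk[j]:
--             dist += fk[i] not in idle
--             i += 1
--         elif sk[j] < fk[i]:
--             dist += sk[j] not in idle
--             j += 1
--         else:
--             dist += first_feats[fk[i]] != second_feats[sk[j]]
--             i += 1
--             j += 1
--     for k in fk[i:]:
--         dist += k not in idle
--     for k in sk[j:]:
--         dist += k not in idle
--     return dist
-- ===== Notes on version B (the rewrite author's own statement) =====
-- stated objective: alternative
-- what changed: After the same tag parsing, A's two dict-driven loops (items() with .get lookups, then a second keys scan) are replaced by sorting both feature-key lists and walking them with a two-pointer merge scan that handles common keys, first-only keys and second-only keys as it goes.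
import Mathlib
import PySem

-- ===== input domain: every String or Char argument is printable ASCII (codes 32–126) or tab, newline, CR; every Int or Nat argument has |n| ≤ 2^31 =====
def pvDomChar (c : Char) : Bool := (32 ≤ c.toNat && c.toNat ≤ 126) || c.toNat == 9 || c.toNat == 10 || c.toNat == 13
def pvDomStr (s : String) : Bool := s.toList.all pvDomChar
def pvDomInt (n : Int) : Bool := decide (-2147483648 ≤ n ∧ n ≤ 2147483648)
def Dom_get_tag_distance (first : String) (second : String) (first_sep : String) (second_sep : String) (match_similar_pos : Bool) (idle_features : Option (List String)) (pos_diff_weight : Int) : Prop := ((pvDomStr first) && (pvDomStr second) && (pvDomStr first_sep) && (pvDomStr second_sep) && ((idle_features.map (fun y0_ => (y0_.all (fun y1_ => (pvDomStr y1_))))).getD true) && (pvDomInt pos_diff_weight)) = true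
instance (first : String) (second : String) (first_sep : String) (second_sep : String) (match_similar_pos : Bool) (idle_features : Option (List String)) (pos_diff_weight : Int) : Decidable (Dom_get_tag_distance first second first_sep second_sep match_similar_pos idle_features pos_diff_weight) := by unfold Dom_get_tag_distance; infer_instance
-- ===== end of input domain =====

-- B replaces A's two dict-lookup loops by a sort + two-pointer merge scan of the feature keys (objective: alternative).

-- ===== PORT A =====
-- shared module context: IDLE_FEATURES (a set used only for membership), _are_equal_pos,
-- and make_pos_and_tag specialised to return_mode="dict" (the only mode either call uses).
def IDLE_FEATURES : List String := ["Voice", "Animacy", "Degree", "Mood", "VerbForm", "PronType", "Strength"]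

def are_equal_pos (first second : String) : Bool :=
  first == second ||
    [["NOUN", "PROPN"], ["AUX", "VERB"], ["CCONJ", "SCONJ"]].any
      (fun parts => parts.contains first && parts.contains second)

-- 'if tag.endswith(" _"): tag = tag[:-2]'
def stripTag (tag : String) : String :=
  if PySem.Str.endswith tag " _" then PySem.Str.slice tag none (some (-2)) else tag

-- 'tag.split("|") if tag != "" else []'
def featElems (rest : String) : List String :=
  if rest ≠ "" then (PySem.Str.split? rest "|").getD [] else []

-- dict(tuple(elem.split("=")) for elem in elems): none where Python's dict(...) raises ValueError
def featPairs : List String → Option (List (String × String))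
  | [] => some []
  | e :: rest =>
    match (PySem.Str.split? e "=").getD [] with
    | [k, v] =>
      match featPairs rest with
      | some ps => some ((k, v) :: ps)
      | none => none
    | _ => none

-- make_pos_and_tag(tag, sep, return_mode="dict"); none exactly where the Python raises
-- (sep = "" with sep in tag: ValueError from split; a "|"-element without exactly one "=": ValueError from dict(...))
def make_pos_and_tag_dict (tag sep : String) : Option (String × PySem.Dict String String) :=
  if PySem.Str.isIn sep (stripTag tag) then
    match PySem.Str.splitMax? (stripTag tag) sep 1 with
    | none => none
    | some pieces =>
      match featPairs (featElems (pieces.getD 1 "")) with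
      | some ps => some (pieces.getD 0 "", PySem.Dict.ofList ps)
      | none => none
  else
    some (stripTag tag, PySem.Dict.empty)

def get_tag_distance (first : String) (second : String) (first_sep : String) (second_sep : String) (match_similar_pos : Bool) (idle_features : Option (List String)) (pos_diff_weight : Int) : Int :=
  let idle := idle_features.getD IDLE_FEATURES
  match make_pos_and_tag_dict first first_sep, make_pos_and_tag_dict second second_sep with
  | some (first_pos, first_feats), some (second_pos, second_feats) =>
    let are_pos_equal :=
      if match_similar_pos then are_equal_pos first_pos second_pos else first_pos == second_pos
    let dist : Int := (if are_pos_equal then 0 else 1) * pos_diff_weight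
    let dist := first_feats.items.foldl (fun dist kv =>
      match second_feats.get? kv.1 with
      | none => dist + (if idle.contains kv.1 then 0 else 1)
      | some other => dist + (if kv.2 ≠ other then 1 else 0)) dist
    let dist := second_feats.keys.foldl (fun dist key =>
      dist + (if !first_feats.contains key && !idle.contains key then 1 else 0)) dist
    dist
  | _, _ => 0  -- unreachable under Pre_ (the Python raises here)

-- ===== PORT B =====
-- the two-pointer 'while i < len(fk) and j < len(sk)' merge scan plus the two leftover
-- 'for k in fk[i:]' / 'for k in sk[j:]' loops, as structural recursion on the two sorted key lists
def mergeScan (idle : List String) (ff sf : PySem.Dict String String) :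
    List String → List String → Int
  | [], ys => (ys.map (fun k => if idle.contains k then (0 : Int) else 1)).sum
  | x :: xs, [] => ((x :: xs).map (fun k => if idle.contains k then (0 : Int) else 1)).sum
  | x :: xs, y :: ys =>
    if x < y then
      (if idle.contains x then 0 else 1) + mergeScan idle ff sf xs (y :: ys)
    else if y < x then
      (if idle.contains y then 0 else 1) + mergeScan idle ff sf (x :: xs) ys
    else
      (if ff.getD x "" ≠ sf.getD y "" then 1 else 0) + mergeScan idle ff sf xs ys

def get_tag_distance_alt (first : String) (second : String) (first_sep : String) (second_sep : String) (match_similar_pos : Bool) (idle_features : Option (List String)) (pos_diff_weight : Int) : Int :=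
  let idle := idle_features.getD IDLE_FEATURES
  match make_pos_and_tag_dict first first_sep with
  | none => 0  -- unreachable under Pre_
  | some (first_pos, first_feats) =>
    match make_pos_and_tag_dict second second_sep with
    | none => 0  -- unreachable under Pre_
    | some (second_pos, second_feats) =>
    let pos_ok :=
      if match_similar_pos then are_equal_pos first_pos second_pos else first_pos == second_pos
    let base : Int := if pos_ok then 0 else pos_diff_weight
    let fk := PySem.List.sorted first_feats.keys (fun k => k) false
    let sk := PySem.List.sorted second_feats.keys (fun k => k) false
    base + mergeScan idle first_feats second_feats fk sk

-- ===== PRECONDITION & SPEC =====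
-- the features substring of the tag, as make_pos_and_tag extracts it
def featPart (tag sep : String) : String :=
  if PySem.Str.isIn sep (stripTag tag) then
    ((PySem.Str.splitMax? (stripTag tag) sep 1).getD []).getD 1 ""
  else ""

-- shape condition: every "|"-separated feature element splits on "=" into exactly two parts
def tagOk (tag sep : String) : Bool :=
  featPart tag sep == "" ||
    ((PySem.Str.split? (featPart tag sep) "|").getD []).all
      (fun e => ((PySem.Str.split? e "=").getD []).length == 2)

-- Pre_ excludes exactly the inputs where Python A raises: an empty separator occurring in the tag
-- (ValueError from str.split) or a feature element without exactly one "=" (ValueError from dict(...)).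
def Pre_get_tag_distance (first : String) (second : String) (first_sep : String) (second_sep : String) (match_similar_pos : Bool) (idle_features : Option (List String)) (pos_diff_weight : Int) : Prop :=
  first_sep ≠ "" ∧ second_sep ≠ "" ∧ tagOk first first_sep = true ∧ tagOk second second_sep = true
instance (first : String) (second : String) (first_sep : String) (second_sep : String) (match_similar_pos : Bool) (idle_features : Option (List String)) (pos_diff_weight : Int) : Decidable (Pre_get_tag_distance first second first_sep second_sep match_similar_pos idle_features pos_diff_weight) := by unfold Pre_get_tag_distance; infer_instance

def pvWitness_get_tag_distance : String × String × String × String × Bool × Option (List String) × Int :=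
  ("VERB,Mood=Ind|Tense=Past", "VERB Tense=Pres", ",", " ", true, none, 2)

def Spec_get_tag_distance (first : String) (second : String) (first_sep : String) (second_sep : String) (match_similar_pos : Bool) (idle_features : Option (List String)) (pos_diff_weight : Int) (out : Int) : Prop := out = get_tag_distance_alt first second first_sep second_sep match_similar_pos idle_features pos_diff_weight
instance (first : String) (second : String) (first_sep : String) (second_sep : String) (match_similar_pos : Bool) (idle_features : Option (List String)) (pos_diff_weight : Int) (out : Int) : Decidable (Spec_get_tag_distance first second first_sep second_sep match_similar_pos idle_features pos_diff_weight out) := by unfold Spec_get_tag_distance; infer_instance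

-- ===== CLAIM (what is proved, stated in full; the proofs are below) =====
def Claim_equal_get_tag_distance : Prop := ∀ (first : String) (second : String) (first_sep : String) (second_sep : String) (match_similar_pos : Bool) (idle_features : Option (List String)) (pos_diff_weight : Int), Dom_get_tag_distance first second first_sep second_sep match_similar_pos idle_features pos_diff_weight → Pre_get_tag_distance first second first_sep second_sep match_similar_pos idle_features pos_diff_weight → Spec_get_tag_distance first second first_sep second_sep match_similar_pos idle_features pos_diff_weight (get_tag_distance first second first_sep second_sep match_similar_pos idle_features pos_diff_weight)

-- ===== LEMMAS AND PROOFS =====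

-- str.split(sep, 1) succeeds whenever sep is nonempty
theorem splitMax?_isSome (s sep : String) (m : Int) (hsep : sep ≠ "") :
    ∃ pieces, PySem.Str.splitMax? s sep m = some pieces := by
  have hl : sep.toList ≠ [] := by
    intro hn; exact hsep (by cases sep; simp_all)
  rw [Option.isSome_iff_exists.symm] at *
  show (PySem.Str.splitMax? s sep m).isSome = true
  simp only [PySem.Str.splitMax?]
  unfold PySem.Chars.splitMax?
  split
  · rename_i hc; exact absurd (List.isEmpty_iff.mp hc) hl
  · simp

-- featPairs succeeds on every list of well-shaped elements
theorem featPairs_isSome (elems : List String)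
    (h : ∀ e ∈ elems, ((PySem.Str.split? e "=").getD []).length = 2) :
    ∃ ps, featPairs elems = some ps := by
  induction elems with
  | nil => exact ⟨[], rfl⟩
  | cons e rest ih =>
    obtain ⟨ps, hps⟩ := ih (fun x hx => h x (List.mem_cons_of_mem _ hx))
    have he := h e List.mem_cons_self
    match hsp : (PySem.Str.split? e "=").getD [] with
    | [k, v] => exact ⟨(k, v) :: ps, by simp [featPairs, hsp, hps]⟩
    | [] => rw [hsp] at he; simp at he
    | [x] => rw [hsp] at he; simp at he
    | x :: y :: z :: t => rw [hsp] at he; simp at he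

-- under tagOk the parse succeeds and yields a dict with Nodup keys
theorem parse_isSome (tag sep : String) (hsep : sep ≠ "") (hok : tagOk tag sep = true) :
    ∃ pos d, make_pos_and_tag_dict tag sep = some (pos, d) ∧ d.keys.Nodup := by
  by_cases hin : PySem.Str.isIn sep (stripTag tag) = true
  · obtain ⟨pieces, hpieces⟩ := splitMax?_isSome (stripTag tag) sep 1 hsep
    have hfp : featPart tag sep = pieces.getD 1 "" := by
      simp only [featPart, if_pos hin, hpieces, Option.getD_some]
    have hsome : ∃ ps, featPairs (featElems (pieces.getD 1 "")) = some ps := by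
      unfold featElems
      by_cases hr : pieces.getD 1 "" = ""
      · rw [if_neg (by simpa using hr)]; exact ⟨[], rfl⟩
      · rw [if_pos hr]
        apply featPairs_isSome
        intro e he
        unfold tagOk at hok
        rw [hfp] at hok
        simp only [beq_iff_eq, Bool.or_eq_true, List.all_eq_true] at hok
        rcases hok with h0 | h
        · exact absurd h0 (by simpa using hr)
        · have := h e (by simpa using he)
          simpa using this
    obtain ⟨ps, hps⟩ := hsome
    refine ⟨pieces.getD 0 "", PySem.Dict.ofList ps, ?_, PySem.Dict.nodup_keys_ofList ps⟩
    unfold make_pos_and_tag_dict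
    rw [if_pos hin]
    simp only [hpieces, hps]
  · refine ⟨stripTag tag, PySem.Dict.empty, ?_, PySem.Dict.nodup_keys_empty⟩
    unfold make_pos_and_tag_dict
    rw [if_neg hin]

-- a strictly sorted list: the head is below the tail
theorem pairwise_lt_of_sorted_nodup (l sl : List String)
    (hperm : sl.Perm l) (hnd : l.Nodup) (hle : sl.Pairwise (fun a b => a ≤ b)) :
    sl.Pairwise (· < ·) := by
  have hnd' : sl.Nodup := hperm.nodup_iff.mpr hnd
  exact (hle.and hnd').imp (fun h => lt_of_le_of_ne h.1 h.2)

-- characterisation of the merge scan on strictly sorted key lists (fuel n bounds the total length)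
theorem mergeScan_spec_aux (idle : List String) (ff sf : PySem.Dict String String) :
    ∀ (n : Nat) (xs ys : List String), xs.length + ys.length ≤ n →
    xs.Pairwise (· < ·) → ys.Pairwise (· < ·) →
    mergeScan idle ff sf xs ys =
      (xs.map (fun k =>
        if ys.contains k then (if ff.getD k "" ≠ sf.getD k "" then (1 : Int) else 0)
        else (if idle.contains k then 0 else 1))).sum
      + ((ys.filter (fun k => !xs.contains k)).map
          (fun k => if idle.contains k then (0 : Int) else 1)).sum := by
  intro n
  induction n with
  | zero =>
    intro xs ys hlen _ _
    cases xs with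
    | nil => simp [mergeScan]
    | cons x xs => simp at hlen
  | succ n ih =>
    intro xs ys hlen hx hy
    match xs, ys with
    | [], ys => simp [mergeScan]
    | x :: xs, [] => simp [mergeScan]
    | x :: xs, y :: ys =>
      have hxt := List.pairwise_cons.mp hx
      have hyt := List.pairwise_cons.mp hy
      by_cases hlt : x < y
      · -- first-only head x
        have hx_notin : x ∉ y :: ys := by
          intro hm
          rcases List.mem_cons.mp hm with h | h
          · exact absurd h (ne_of_lt hlt)
          · exact absurd (lt_trans hlt (hyt.1 x h)) (lt_irrefl x)
        have IH := ih xs (y :: ys) (by simp at hlen ⊢; omega) hxt.2 hy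
        simp only [mergeScan, if_pos hlt]
        rw [IH]
        have hfilter : (y :: ys).filter (fun k => !(x :: xs).contains k)
            = (y :: ys).filter (fun k => !xs.contains k) := by
          apply List.filter_congr
          intro z hz
          have hzx : z ≠ x := by
            intro he; exact hx_notin (he ▸ hz)
          simp [List.contains_cons, hzx]
        have hcx : ((y :: ys).contains x) = false := by
          rw [Bool.eq_false_iff]
          intro hc
          exact hx_notin (by simpa using hc)
        rw [hfilter]
        simp only [List.map_cons, List.sum_cons, hcx, Bool.false_eq_true, if_false]
        ring
      · by_cases hgt : y < x
        · -- second-only head y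
          have hy_notin : y ∉ x :: xs := by
            intro hm
            rcases List.mem_cons.mp hm with h | h
            · exact absurd h (ne_of_lt hgt)
            · exact absurd (lt_trans hgt (hxt.1 y h)) (lt_irrefl y)
          have IH := ih (x :: xs) ys (by simp at hlen ⊢; omega) hx hyt.2
          simp only [mergeScan, if_neg hlt, if_pos hgt]
          rw [IH]
          have hmap : (x :: xs).map (fun k =>
              if (y :: ys).contains k then (if ff.getD k "" ≠ sf.getD k "" then (1 : Int) else 0)
              else (if idle.contains k then 0 else 1))
              = (x :: xs).map (fun k =>
              if ys.contains k then (if ff.getD k "" ≠ sf.getD k "" then (1 : Int) else 0)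
              else (if idle.contains k then 0 else 1)) := by
            apply List.map_congr_left
            intro k hk
            have hky : k ≠ y := by
              intro he; exact hy_notin (he ▸ hk)
            simp [List.contains_cons, hky]
          have hcy : ((x :: xs).contains y) = false := by
            rw [Bool.eq_false_iff]
            intro hc
            exact hy_notin (by simpa using hc)
          rw [hmap]
          simp only [List.filter_cons, hcy, Bool.not_false, if_pos, List.map_cons, List.sum_cons]
          ring
        · -- equal heads
          have heq : x = y := le_antisymm (not_lt.mp hgt) (not_lt.mp hlt)
          subst heq
          have IH := ih xs ys (by simp at hlen ⊢; omega) hxt.2 hyt.2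
          simp only [mergeScan, if_neg hlt, if_neg hgt]
          rw [IH]
          have hmap : xs.map (fun k =>
              if (x :: ys).contains k then (if ff.getD k "" ≠ sf.getD k "" then (1 : Int) else 0)
              else (if idle.contains k then 0 else 1))
              = xs.map (fun k =>
              if ys.contains k then (if ff.getD k "" ≠ sf.getD k "" then (1 : Int) else 0)
              else (if idle.contains k then 0 else 1)) := by
            apply List.map_congr_left
            intro k hk
            have hkx : k ≠ x := ne_of_gt (hxt.1 k hk)
            simp [List.contains_cons, hkx]
          have hfilter : ys.filter (fun k => !(x :: xs).contains k)
              = ys.filter (fun k => !xs.contains k) := by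
            apply List.filter_congr
            intro z hz
            have hzx : z ≠ x := ne_of_gt (hyt.1 z hz)
            simp [List.contains_cons, hzx]
          have hcx : ((x :: ys).contains x) = true := by simp
          have hcxx : ((x :: xs).contains x) = true := by simp
          simp only [List.map_cons, List.sum_cons, List.filter_cons, hcx, hcxx,
            Bool.not_true, if_pos, Bool.false_eq_true, if_false, hmap, hfilter]
          ring

-- characterisation of the merge scan on strictly sorted key lists
theorem mergeScan_spec (idle : List String) (ff sf : PySem.Dict String String) :
    ∀ (xs ys : List String), xs.Pairwise (· < ·) → ys.Pairwise (· < ·) →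
    mergeScan idle ff sf xs ys =
      (xs.map (fun k =>
        if ys.contains k then (if ff.getD k "" ≠ sf.getD k "" then (1 : Int) else 0)
        else (if idle.contains k then 0 else 1))).sum
      + ((ys.filter (fun k => !xs.contains k)).map
          (fun k => if idle.contains k then (0 : Int) else 1)).sum :=
  fun xs ys hx hy =>
    mergeScan_spec_aux idle ff sf (xs.length + ys.length) xs ys (le_refl _) hx hy

-- A's first loop (over first_feats.items()) equals the merge's common/first-only terms
theorem loop1_eq (ff sf : PySem.Dict String String) (idle sk : List String)
    (hf : ff.keys.Nodup) (hsk : ∀ k, (k ∈ sk) ↔ sf.contains k = true) :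
    (ff.items.map (fun kv : String × String =>
      match sf.get? kv.1 with
      | none => (if idle.contains kv.1 then (0:Int) else 1)
      | some other => (if kv.2 ≠ other then 1 else 0))).sum
    = (ff.keys.map (fun k =>
        if sk.contains k then (if ff.getD k "" ≠ sf.getD k "" then (1:Int) else 0)
        else (if idle.contains k then 0 else 1))).sum := by
  have hkeys : ff.keys = ff.items.map (·.1) := rfl
  rw [hkeys, List.map_map]
  congr 1
  apply List.map_congr_left
  intro kv hkv
  have hgd : ff.getD kv.1 "" = kv.2 := PySem.Dict.getD_of_mem_items ff hkv hf ""
  cases hs : sf.get? kv.1 with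
  | none =>
    have hcs : sf.contains kv.1 = false := by
      rw [PySem.Dict.contains_eq_isSome_get?, hs]; rfl
    have hmem : kv.1 ∉ sk := by
      intro hm
      rw [(hsk kv.1).mp hm] at hcs
      exact absurd hcs (by simp)
    simp [Function.comp, hmem]
  | some other =>
    have hcs : sf.contains kv.1 = true := by
      rw [PySem.Dict.contains_eq_isSome_get?, hs]; rfl
    have hmem : kv.1 ∈ sk := (hsk kv.1).mpr hcs
    have hgs : sf.getD kv.1 "" = other := PySem.Dict.getD_of_get?_eq_some sf "" hs
    simp [Function.comp, hmem, hgd, hgs]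

-- a 0-padded sum collapses to a sum over the filtered list
theorem sum_map_guard (p : String → Bool) (h : String → Int) (l : List String) :
    (l.map (fun k => if p k then h k else 0)).sum = ((l.filter p).map h).sum := by
  induction l with
  | nil => rfl
  | cons k rest ih =>
    simp only [List.map_cons, List.sum_cons, List.filter_cons]
    cases hc : p k with
    | true => simp [ih]
    | false => simp [ih]

-- A's second loop equals the merge's second-only terms
theorem loop2_eq (ff : PySem.Dict String String) (idle fk l : List String)
    (hfk : ∀ k, (k ∈ fk) ↔ ff.contains k = true) :
    (l.map (fun key => if !ff.contains key && !idle.contains key then (1:Int) else 0)).sum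
    = ((l.filter (fun k => !fk.contains k)).map
        (fun k => if idle.contains k then (0:Int) else 1)).sum := by
  have hpt : (fun k => !fk.contains k) = (fun k => !ff.contains k) := by
    funext k
    congr 1
    rw [Bool.eq_iff_iff]
    simp only [List.contains_iff_mem] at *
    constructor
    · intro h; exact (hfk k).mp (by simpa using h)
    · intro h; simpa using (hfk k).mpr (by simpa using h)
  rw [hpt]
  have h1 : (fun key => if !ff.contains key && !idle.contains key then (1:Int) else 0)
      = (fun key => if !ff.contains key then (if idle.contains key then 0 else 1) else 0) := by
    funext key
    cases h : ff.contains key <;> cases h2 : idle.contains key <;> simp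
  rw [h1, sum_map_guard]

-- ===== VERDICT (by name: the statement is the Claim_ definition above) =====
theorem get_tag_distance_spec : Claim_equal_get_tag_distance := by
  intro first second first_sep second_sep match_similar_pos idle_features pos_diff_weight _ hpre
  obtain ⟨h1, h2, hok1, hok2⟩ := hpre
  obtain ⟨fp, ff, hparse1, hnf⟩ := parse_isSome first first_sep h1 hok1
  obtain ⟨sp, sf, hparse2, hns⟩ := parse_isSome second second_sep h2 hok2
  unfold Spec_get_tag_distance get_tag_distance get_tag_distance_alt
  rw [hparse1, hparse2]
  simp only
  set idle := idle_features.getD IDLE_FEATURES with hidle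
  set posEq := (if match_similar_pos then are_equal_pos fp sp else fp == sp) with hpos
  set fk := PySem.List.sorted ff.keys (fun k => k) false with hfk
  set sk := PySem.List.sorted sf.keys (fun k => k) false with hskdef
  have hfperm : fk.Perm ff.keys := PySem.List.sorted_perm ff.keys (fun k => k) false
  have hsperm : sk.Perm sf.keys := PySem.List.sorted_perm sf.keys (fun k => k) false
  have hfsort : fk.Pairwise (· < ·) :=
    pairwise_lt_of_sorted_nodup _ _ hfperm hnf
      (PySem.List.sorted_pairwise ff.keys (fun k => k))
  have hssort : sk.Pairwise (· < ·) :=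
    pairwise_lt_of_sorted_nodup _ _ hsperm hns
      (PySem.List.sorted_pairwise sf.keys (fun k => k))
  -- first loop body in acc + f x shape
  have hbody1 : (fun (dist : Int) (kv : String × String) =>
      match sf.get? kv.1 with
      | none => dist + (if idle.contains kv.1 then 0 else 1)
      | some other => dist + (if kv.2 ≠ other then 1 else 0))
      = (fun (dist : Int) kv => dist + (match sf.get? kv.1 with
      | none => (if idle.contains kv.1 then (0:Int) else 1)
      | some other => (if kv.2 ≠ other then 1 else 0))) := by
    funext dist kv
    cases sf.get? kv.1 <;> rfl
  rw [hbody1, PySem.List.foldl_add, PySem.List.foldl_add]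
  have hbase : ((if posEq then (0:Int) else 1) * pos_diff_weight)
      = (if posEq then 0 else pos_diff_weight) := by
    cases posEq <;> simp
  rw [hbase]
  rw [mergeScan_spec idle ff sf fk sk hfsort hssort]
  have hmemf : ∀ k, (k ∈ fk) ↔ ff.contains k = true := by
    intro k
    rw [hfperm.mem_iff, PySem.Dict.contains_iff_mem_keys]
  have hmems : ∀ k, (k ∈ sk) ↔ sf.contains k = true := by
    intro k
    rw [hsperm.mem_iff, PySem.Dict.contains_iff_mem_keys]
  rw [loop1_eq ff sf idle sk hnf hmems]
  rw [loop2_eq ff idle fk sf.keys hmemf]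
  -- replace sums over keys by sums over the sorted permutations
  have e1 : (ff.keys.map (fun k =>
        if sk.contains k then (if ff.getD k "" ≠ sf.getD k "" then (1:Int) else 0)
        else (if idle.contains k then 0 else 1))).sum
      = (fk.map (fun k =>
        if sk.contains k then (if ff.getD k "" ≠ sf.getD k "" then (1:Int) else 0)
        else (if idle.contains k then 0 else 1))).sum :=
    ((hfperm.map _).sum_eq).symm
  have e2 : ((sf.keys.filter (fun k => !fk.contains k)).map
        (fun k => if idle.contains k then (0:Int) else 1)).sum
      = ((sk.filter (fun k => !fk.contains k)).map
        (fun k => if idle.contains k then (0:Int) else 1)).sum :=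
    (((hsperm.filter _).map _).sum_eq).symm
  rw [e1, e2]
  ring
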